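-- pv_equiv track=rewrite | github.com/TheExplorativeBadger/CS576 | notebook_modules/shortestSuperstring.py | merge_ordered_reads
-- ===== SOURCE A (Python) =====
-- def overlap_length(left, right):
--     """Returns the length of the longest suffix of left that is a prefix of right
--
--     Args:
--         left: a string
--         right: a string
--     Returns:
--         An integer length of the longest overlap (0 if there is no overlap)
--     """
--     counter = 0
--     overlapCount = 0
--     continueLooping = True
--     while continueLooping == True:
--         leftPrefix = left[counter:len(left)]
--         if (right.startswith(leftPrefix)):
--             overlapCount = len(left) - counter
--             continueLooping = False
--         else:
--             counter += 1
--             if (counter == len(left)):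
--                 continueLooping = False
--
--     return overlapCount
--
-- def merge_ordered_reads(reads):
--     """Returns the shortest superstring resulting from
--     merging a list of ordered reads.
--
--     Args:
--         reads: a list of strings
--     Returns:
--         A string that is a shortest superstring of the ordered input read strings.
--     """
--
--     shortestSuperstring = ""
--     if (len(reads) != 0):
--         shortestSuperstring = reads[0]
--         for i in range(len(reads)-1):
--             leftRead = reads[i]
--             rightRead = reads[i+1]
--             overlapCount = overlap_length(leftRead, rightRead)
--             superstringAddition = rightRead[overlapCount:len(rightRead)]
--             shortestSuperstring = shortestSuperstring + superstringAddition
--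
--     return shortestSuperstring
-- ===== SOURCE B (Python) =====
-- def merge_ordered_reads(reads):
--     """Shortest superstring of ordered reads: for each consecutive pair keep only
--     the non-overlapping tail of the right read, collected and joined in one pass."""
--     if not reads:
--         return ""
--     parts = [reads[0]]
--     for left, right in zip(reads, reads[1:]):
--         best = 0
--         for k in range(1, min(len(left), len(right)) + 1):
--             if left[len(left) - k:] == right[:k]:
--                 best = k
--         parts.append(right[best:])
--     return "".join(parts)
-- ===== Notes on version B (the rewrite author's own statement) =====
-- stated objective: alternative
-- what changed: B replaces A's descending first-match while-loop (startswith on ever-shorter suffixes) and repeated string concatenation by a zip over consecutive pairs, an ascending max-tracking scan capped at min(len(left), len(right)), and a single join of the collected tails.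
import Mathlib
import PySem

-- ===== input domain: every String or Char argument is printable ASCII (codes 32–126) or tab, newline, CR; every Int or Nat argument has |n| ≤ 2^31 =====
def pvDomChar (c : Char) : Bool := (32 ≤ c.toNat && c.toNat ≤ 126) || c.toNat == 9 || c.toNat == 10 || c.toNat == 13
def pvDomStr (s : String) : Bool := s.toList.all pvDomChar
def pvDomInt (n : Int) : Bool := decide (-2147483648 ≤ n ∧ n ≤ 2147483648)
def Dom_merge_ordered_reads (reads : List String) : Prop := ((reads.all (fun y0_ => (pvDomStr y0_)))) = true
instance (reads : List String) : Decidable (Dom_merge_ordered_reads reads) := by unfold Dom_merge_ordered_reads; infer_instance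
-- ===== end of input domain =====

-- B is an alternative implementation: one pass over consecutive pairs (zip) collecting
-- the non-overlapping tails and joining once, with the overlap found by an ascending
-- max-tracking scan capped at min(len(left), len(right)) instead of A's descending
-- first-match while-loop with repeated string concatenation. Same cost class; no speed claim.

-- ===== PORT A =====
-- A's while-loop in overlap_length, as recursion with the Python counter; the fuel
-- (left.length + 1) bounds the loop's iteration count and is never exhausted.
def pvOvLoopA (left right : List Char) : Nat → Nat → Int
  | _, 0 => 0
  | c, fuel + 1 =>
    if PySem.Chars.startswith right
        (PySem.Chars.slice left (some (c : Int)) (some (left.length : Int))) then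
      (left.length : Int) - (c : Int)
    else if c + 1 = left.length then 0
    else pvOvLoopA left right (c + 1) fuel

def overlap_length (left right : List Char) : Int :=
  pvOvLoopA left right 0 (left.length + 1)

def merge_ordered_reads (reads : List String) : String :=
  if reads.length ≠ 0 then
    let rs := reads.map String.toList
    let start := PySem.List.pyGetD rs 0 []
    let res := (PySem.List.pyRange 0 ((reads.length : Int) - 1) 1).foldl (fun acc i =>
      let leftRead := PySem.List.pyGetD rs i []
      let rightRead := PySem.List.pyGetD rs (i + 1) []
      let overlapCount := overlap_length leftRead rightRead
      let addition := PySem.Chars.slice rightRead (some overlapCount) (some (rightRead.length : Int))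
      acc ++ addition) start
    String.ofList res
  else String.ofList []

-- ===== PORT B =====
-- B's inner loop: ascending k = 1 .. min(len l, len r), keeping the last k whose
-- length-k suffix of l equals the length-k prefix of r.
def pvBestOv (l r : List Char) : Int :=
  (PySem.List.pyRange 1 ((min l.length r.length : Nat) + 1 : Int) 1).foldl
    (fun best k =>
      if PySem.Chars.slice l (some ((l.length : Int) - k)) none
          = PySem.Chars.slice r none (some k) then k else best) 0

def merge_ordered_reads_alt (reads : List String) : String :=
  match reads with
  | [] => ""
  | r0 :: rest =>
    let rs := (r0 :: rest).map String.toList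
    let parts := r0.toList ::
      (rs.zip rs.tail).map (fun p => PySem.Chars.slice p.2 (some (pvBestOv p.1 p.2)) none)
    String.ofList (PySem.Chars.join [] parts)

-- ===== PRECONDITION & SPEC =====
def Spec_merge_ordered_reads (reads : List String) (out : String) : Prop := out = merge_ordered_reads_alt reads
instance (reads : List String) (out : String) : Decidable (Spec_merge_ordered_reads reads out) := by unfold Spec_merge_ordered_reads; infer_instance

-- ===== CLAIM (what is proved, stated in full; the proofs are below) =====
def Claim_equal_merge_ordered_reads : Prop := ∀ (reads : List String), Dom_merge_ordered_reads reads → Spec_merge_ordered_reads reads (merge_ordered_reads reads)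

-- ===== LEMMAS AND PROOFS =====

-- Reference overlap: greatest k ≤ m with (length-k suffix of l) = (length-k prefix of r).
def ovRef (l r : List Char) : Nat → Nat
  | 0 => 0
  | k + 1 => if l.drop (l.length - (k + 1)) = r.take (k + 1) then k + 1 else ovRef l r k

-- variant with A's predicate (startswith), over the full range up to l.length
def ovRefA (l r : List Char) : Nat → Nat
  | 0 => 0
  | k + 1 =>
    if PySem.Chars.startswith r (l.drop (l.length - (k + 1))) then k + 1 else ovRefA l r k

lemma startswith_eq_takeEq (l r : List Char) (k : Nat) (hk : k ≤ l.length) :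
    PySem.Chars.startswith r (l.drop (l.length - k)) = true ↔
      l.drop (l.length - k) = r.take k := by
  rw [PySem.Chars.startswith_iff, List.prefix_iff_eq_take]
  have : (l.drop (l.length - k)).length = k := by simp; omega
  rw [this]

-- A's loop computes ovRefA
lemma slice_c_len (l : List Char) (c : Nat) :
    PySem.Chars.slice l (some (c : Int)) (some (l.length : Int)) = l.drop c := by
  simp [PySem.Chars.slice_eq_listSlice, PySem.List.slice_natCast, List.take_of_length_le]

lemma pvOvLoopA_eq (l r : List Char) (fuel : Nat) : ∀ c, c ≤ l.length →
    l.length + 1 - c ≤ fuel →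
    pvOvLoopA l r c fuel = ((ovRefA l r (l.length - c) : Nat) : Int) := by
  induction fuel with
  | zero => intro c hc hf; omega
  | succ fuel ih =>
    intro c hc hf
    rw [pvOvLoopA, slice_c_len]
    by_cases hs : PySem.Chars.startswith r (l.drop c) = true
    · rw [if_pos hs]
      rcases Nat.eq_or_lt_of_le hc with heq | hlt
      · have h0 : l.length - c = 0 := by omega
        rw [h0]; simp [ovRefA]; omega
      · have hk : l.length - c = (l.length - c - 1) + 1 := by omega
        rw [hk, ovRefA]
        have : l.length - ((l.length - c - 1) + 1) = c := by omega
        rw [this, if_pos hs]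
        push_cast; omega
    · rw [if_neg hs]
      have hclt : c < l.length := by
        rcases Nat.eq_or_lt_of_le hc with heq | hlt
        · exfalso; apply hs
          rw [heq, List.drop_length, PySem.Chars.startswith_iff]
          exact List.nil_prefix
        · exact hlt
      have hk : l.length - c = (l.length - (c+1)) + 1 := by omega
      rw [hk, ovRefA]
      have h2 : l.length - ((l.length - (c+1)) + 1) = c := by omega
      rw [h2, if_neg hs]
      by_cases he : c + 1 = l.length
      · rw [if_pos he]
        have : l.length - (c+1) = 0 := by omega
        rw [this]; simp [ovRefA]
      · rw [if_neg he, ih (c+1) (by omega) (by omega)]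

-- above min(len l, len r), A's predicate is false
lemma ovRefA_high (l r : List Char) (d : Nat)
    (hle : min l.length r.length + d ≤ l.length) :
    ovRefA l r (min l.length r.length + d) = ovRefA l r (min l.length r.length) := by
  induction d with
  | zero => rfl
  | succ d ih =>
    have h1 : min l.length r.length + (d+1) = (min l.length r.length + d) + 1 := by omega
    rw [h1, ovRefA]
    have hfalse : ¬ PySem.Chars.startswith r (l.drop (l.length - (min l.length r.length + d + 1))) = true := by
      rw [PySem.Chars.startswith_iff]
      intro hpre
      have := hpre.length_le
      simp at this
      omega
    rw [if_neg hfalse, ih (by omega)]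

lemma ovRefA_eq_ovRef (l r : List Char) (k : Nat) (hk : k ≤ min l.length r.length) :
    ovRefA l r k = ovRef l r k := by
  induction k with
  | zero => rfl
  | succ k ih =>
    rw [ovRefA, ovRef, ih (by omega)]
    have h := startswith_eq_takeEq l r (k+1) (by omega)
    by_cases hc : List.drop (l.length - (k + 1)) l = List.take (k + 1) r
    · rw [if_pos (h.mpr hc), if_pos hc]
    · rw [if_neg (fun hh => hc (h.mp hh)), if_neg hc]

lemma overlap_length_eq (l r : List Char) :
    overlap_length l r = ((ovRef l r (min l.length r.length) : Nat) : Int) := by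
  rw [overlap_length, pvOvLoopA_eq l r (l.length + 1) 0 (by omega) (by omega), Nat.sub_zero]
  have h2 := ovRefA_high l r (l.length - min l.length r.length) (by omega)
  rw [Nat.add_sub_cancel' (by omega : min l.length r.length ≤ l.length)] at h2
  rw [h2, ovRefA_eq_ovRef l r _ (le_refl _)]

-- B's fold computes ovRef
lemma pvBestOv_fold (l r : List Char) (m : Nat) (hm : m ≤ l.length) :
    (PySem.List.pyRange 1 ((m : Nat) + 1 : Int) 1).foldl
      (fun best k =>
        if PySem.Chars.slice l (some ((l.length : Int) - k)) none
            = PySem.Chars.slice r none (some k) then k else best) 0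
    = ((ovRef l r m : Nat) : Int) := by
  induction m with
  | zero =>
    have h : PySem.List.pyRange 1 ((0:Nat) + 1 : Int) 1 = [] := by decide
    rw [h]; simp [ovRef]
  | succ m ih =>
    have hr : PySem.List.pyRange 1 (((m+1 : Nat) : Int) + 1) 1
        = PySem.List.pyRange 1 (((m : Nat) : Int) + 1) 1 ++ [((m+1 : Nat) : Int)] := by
      have h := PySem.List.pyRange_one_succ_right (a := 1) (b := ((m:Nat) : Int) + 1) (by omega)
      convert h using 2
    rw [hr, List.foldl_append, ih (by omega)]
    simp only [List.foldl]
    have hcond : (PySem.Chars.slice l (some ((l.length : Int) - ((m+1 : Nat) : Int))) none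
            = PySem.Chars.slice r none (some ((m+1 : Nat) : Int)))
        ↔ (l.drop (l.length - (m+1)) = r.take (m+1)) := by
      have h1 : (l.length : Int) - ((m+1 : Nat) : Int) = ((l.length - (m+1) : Nat) : Int) := by
        push_cast; omega
      rw [h1]
      simp only [PySem.Chars.slice_eq_listSlice, PySem.List.slice_from_natCast]
      rw [PySem.List.slice_to_natCast]
    rw [ovRef]
    by_cases hc : l.drop (l.length - (m+1)) = r.take (m+1)
    · rw [if_pos (hcond.mpr hc), if_pos hc]
    · rw [if_neg (fun hh => hc (hcond.mp hh)), if_neg hc]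

lemma pvBestOv_eq (l r : List Char) :
    pvBestOv l r = ((ovRef l r (min l.length r.length) : Nat) : Int) := by
  rw [pvBestOv, pvBestOv_fold l r (min l.length r.length) (by omega)]


-- A's two-bound slice on the right read equals B's one-bound slice
lemma slice_tail_eq (r : List Char) (k : Nat) :
    PySem.Chars.slice r (some ((k : Nat) : Int)) (some (r.length : Int))
      = PySem.Chars.slice r (some ((k : Nat) : Int)) none := by
  simp [PySem.Chars.slice_eq_listSlice, PySem.List.slice_natCast, PySem.List.slice_from_natCast,
    List.take_of_length_le]

-- the index pairs A reads equal the zip B builds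
lemma range_pairs_eq_zip (rs : List (List Char)) :
    (List.range (rs.length - 1)).map
        (fun (i : Nat) => (PySem.List.pyGetD rs (i : Int) [], PySem.List.pyGetD rs ((i : Int) + 1) []))
      = rs.zip rs.tail := by
  induction rs with
  | nil => simp
  | cons a t ih =>
    cases t with
    | nil => simp
    | cons b t' =>
      simp only [List.length_cons, Nat.add_sub_cancel, List.range_succ_eq_map, List.map_cons,
        List.tail_cons, List.zip_cons_cons]
      congr 1
      · simp only [PySem.List.pyGetD_natCast, Prod.mk.injEq]
        constructor
        · rfl
        · have h0 : ((0:Nat) : Int) + 1 = ((1:Nat) : Int) := by norm_num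
          rw [h0, PySem.List.pyGetD_natCast]
          rfl
      · have htail : (b :: t').tail = t' := rfl
        rw [htail] at ih
        rw [← ih, List.length_cons, Nat.add_sub_cancel, List.map_map]
        apply List.map_congr_left
        intro i hi
        simp only [Function.comp]
        have h1 : (((i+1 : Nat)) : Int) = (i : Int) + 1 := by push_cast; ring
        rw [h1]
        have h2 : ∀ (j : Nat) (xs : List (List Char)) (x : List Char),
            PySem.List.pyGetD (x :: xs) ((j : Int) + 1) [] = PySem.List.pyGetD xs (j : Int) [] := by
          intro j xs x
          have h3 : ((j : Int) + 1) = (((j+1 : Nat)) : Int) := by push_cast; ring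
          rw [h3, PySem.List.pyGetD_natCast, PySem.List.pyGetD_natCast]
          rfl
        have e2 : PySem.List.pyGetD (a :: b :: t') ((i:Int) + 1 + 1) [] = PySem.List.pyGetD t' (i:Int) [] := by
          have h3 : ((i:Int) + 1 + 1) = (((i+1:Nat)):Int) + 1 := by push_cast; ring
          rw [h3, h2, h1, h2]
        rw [h2, e2, h2]

lemma join_empty_eq_flatten (xs : List (List Char)) :
    PySem.Chars.join [] xs = xs.flatten := by
  induction xs with
  | nil => simp [PySem.Chars.join_nil]
  | cons a t ih =>
    cases t with
    | nil => simp [PySem.Chars.join_singleton]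
    | cons b t' => simp only [PySem.Chars.join_cons_cons] at *; simpa using ih

-- ===== VERDICT (by name: the statement is the Claim_ definition above) =====
theorem merge_ordered_reads_spec : Claim_equal_merge_ordered_reads := by
  intro reads _
  unfold Spec_merge_ordered_reads
  cases reads with
  | nil => rfl
  | cons r0 rest =>
    rw [merge_ordered_reads, merge_ordered_reads_alt]
    have hlen : (r0 :: rest : List String).length ≠ 0 := by simp
    rw [if_pos hlen]
    simp only []
    set rs := (r0 :: rest).map String.toList with hrs
    have hc : (((r0 :: rest : List String).length : Nat) : Int) - 1 = ((rest.length : Nat) : Int) := by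
      simp [List.length_cons]
    rw [hc, PySem.List.pyRange_zero_natCast, List.foldl_map,
      PySem.List.foldl_append_eq_flatMap
        (g := fun (i : Nat) =>
          PySem.Chars.slice (PySem.List.pyGetD rs ((i : Int) + 1) [])
            (some (overlap_length (PySem.List.pyGetD rs (i : Int) [])
                                  (PySem.List.pyGetD rs ((i : Int) + 1) [])))
            (some ((PySem.List.pyGetD rs ((i : Int) + 1) []).length : Int)))]
    rw [join_empty_eq_flatten, List.flatten_cons]
    congr 1
    congr 1
    · have h0 : PySem.List.pyGetD rs ((0 : Nat) : Int) [] = rs.getD 0 [] :=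
        PySem.List.pyGetD_natCast rs 0 []
      simpa using h0
    · rw [List.flatMap_def]
      congr 1
      have hmm : (List.range rest.length).map
          (fun (i : Nat) =>
            PySem.Chars.slice (PySem.List.pyGetD rs ((i : Int) + 1) [])
              (some (overlap_length (PySem.List.pyGetD rs (i : Int) [])
                                    (PySem.List.pyGetD rs ((i : Int) + 1) [])))
              (some ((PySem.List.pyGetD rs ((i : Int) + 1) []).length : Int)))
          = ((List.range rest.length).map
              (fun (i : Nat) => (PySem.List.pyGetD rs (i : Int) [], PySem.List.pyGetD rs ((i : Int) + 1) []))).map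
            (fun p => PySem.Chars.slice p.2 (some (overlap_length p.1 p.2)) (some (p.2.length : Int))) := by
        rw [List.map_map]; rfl
      have hlen2 : rs.length - 1 = rest.length := by simp [hrs]
      rw [hmm, ← hlen2, range_pairs_eq_zip rs]
      apply List.map_congr_left
      intro p _
      rw [overlap_length_eq, slice_tail_eq, ← pvBestOv_eq]
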